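-- pv_equiv track=rewrite | github.com/maogongfei-dot/rentalai-backend | modules/contract/explain_engine.py | _format_issue_list
-- ===== SOURCE A (Python) =====
-- def _format_issue_list(items: list[str]) -> str:
--     """Join up to three issue strings for a single sentence."""
--     cleaned = [x.strip() for x in items if x and str(x).strip()][:3]
--     if not cleaned:
--         return ""
--     if len(cleaned) == 1:
--         return cleaned[0]
--     if len(cleaned) == 2:
--         return f"{cleaned[0]} and {cleaned[1]}"
--     return f"{cleaned[0]}, {cleaned[1]}, and {cleaned[2]}"
-- ===== SOURCE B (Python) =====
-- def _format_issue_list(items: list[str]) -> str: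
--     """Join up to three issue strings for a single sentence."""
--     out = ""
--     second = ""  # held back until we know whether a third item arrives
--     count = 0
--     for x in items:
--         if not x:
--             continue
--         s = x.strip()
--         if not s:
--             continue
--         if count == 0:
--             out = s
--         elif count == 1:
--             second = s
--         else:
--             out = out + ", " + second + ", and " + s
--             count = 3
--             break
--         count += 1
--     if count == 2:
--         out = out + " and " + second
--     return out
-- ===== Notes on version B (the rewrite author's own statement) =====
-- stated objective: alternative
-- what changed: Replaces A's build-a-cleaned-list-then-enumerate-four-cases approach with a single pass over the raw items using a state machine (count, out, second) that assembles the sentence incrementally and breaks early at the third kept item; no intermediate list is built.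
import Mathlib
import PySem

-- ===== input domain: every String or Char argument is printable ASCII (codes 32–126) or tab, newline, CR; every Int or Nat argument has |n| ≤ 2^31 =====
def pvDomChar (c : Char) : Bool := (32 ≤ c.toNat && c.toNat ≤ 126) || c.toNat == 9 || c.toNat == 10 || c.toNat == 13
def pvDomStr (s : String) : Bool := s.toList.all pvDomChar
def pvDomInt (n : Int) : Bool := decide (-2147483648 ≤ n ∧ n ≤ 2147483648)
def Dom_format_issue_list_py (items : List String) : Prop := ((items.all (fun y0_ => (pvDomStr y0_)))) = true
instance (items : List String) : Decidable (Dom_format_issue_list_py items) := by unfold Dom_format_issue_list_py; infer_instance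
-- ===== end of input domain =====

-- B replaces A's build-a-cleaned-list-then-enumerate-four-cases approach with a single pass
-- over the raw items: a state machine (count, out, second) assembles the sentence
-- incrementally and breaks at the third kept item; objective: alternative (no list built).

-- ===== PORT A =====
def format_issue_list_py (items : List String) : String :=
  let cleaned := PySem.List.slice
    ((items.filter (fun x => !(x == "") && !(PySem.Str.strip x == ""))).map
      (fun x => PySem.Str.strip x)) none (some 3)
  if cleaned = [] then ""
  else if cleaned.length = 1 then PySem.List.pyGetD cleaned 0 ""
  else if cleaned.length = 2 then
    PySem.List.pyGetD cleaned 0 "" ++ " and " ++ PySem.List.pyGetD cleaned 1 ""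
  else
    PySem.List.pyGetD cleaned 0 "" ++ ", " ++ PySem.List.pyGetD cleaned 1 ""
      ++ ", and " ++ PySem.List.pyGetD cleaned 2 ""

-- ===== PORT B =====
-- the Python for-loop with continue/break, as structural recursion over the items,
-- state = (count, out, second); returns the state when the loop ends or breaks
def pvAltLoop : List String → Nat → String → String → Nat × String × String
  | [], c, out, sec => (c, out, sec)
  | x :: t, c, out, sec =>
    if x == "" then pvAltLoop t c out sec
    else
      let s := PySem.Str.strip x
      if s == "" then pvAltLoop t c out sec
      else if c = 0 then pvAltLoop t 1 s sec
      else if c = 1 then pvAltLoop t 2 out s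
      else (3, out ++ ", " ++ sec ++ ", and " ++ s, sec)

def format_issue_list_py_alt (items : List String) : String :=
  let r := pvAltLoop items 0 "" ""
  if r.1 = 2 then r.2.1 ++ " and " ++ r.2.2 else r.2.1

-- ===== PRECONDITION & SPEC =====
def Spec_format_issue_list_py (items : List String) (out : String) : Prop := out = format_issue_list_py_alt items
instance (items : List String) (out : String) : Decidable (Spec_format_issue_list_py items out) := by unfold Spec_format_issue_list_py; infer_instance

-- ===== CLAIM (what is proved, stated in full; the proofs are below) =====
def Claim_equal_format_issue_list_py : Prop := ∀ (items : List String), Dom_format_issue_list_py items → Spec_format_issue_list_py items (format_issue_list_py items)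

-- ===== LEMMAS AND PROOFS =====

-- the cleaned stream A filters out of the items (before the [:3] cap)
def pvClean (items : List String) : List String :=
  (items.filter (fun x => !(x == "") && !(PySem.Str.strip x == ""))).map
    (fun x => PySem.Str.strip x)

theorem pvClean_cons (x : String) (t : List String) :
    pvClean (x :: t) =
      if x == "" then pvClean t
      else if PySem.Str.strip x == "" then pvClean t
      else PySem.Str.strip x :: pvClean t := by
  simp only [pvClean, List.filter_cons]
  by_cases hx : x = ""
  · simp [hx]
  · by_cases hs : PySem.Str.strip x = "" <;> simp [hx, hs]

-- B's loop from state count = 2, characterised by the cleaned stream of the rest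
theorem pvLoop2 (items : List String) (out sec : String) :
    pvAltLoop items 2 out sec =
      match pvClean items with
      | [] => (2, out, sec)
      | d :: _ => (3, out ++ ", " ++ sec ++ ", and " ++ d, sec) := by
  induction items with
  | nil => simp [pvAltLoop, pvClean]
  | cons x t ih =>
    rw [pvClean_cons]
    by_cases hx : x = ""
    · simpa [pvAltLoop, hx] using ih
    · by_cases hs : PySem.Str.strip x = ""
      · simpa [pvAltLoop, hx, hs] using ih
      · simp [pvAltLoop, hx, hs]

-- B's loop from state count = 1
theorem pvLoop1 (items : List String) (out sec : String) :
    pvAltLoop items 1 out sec =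
      match pvClean items with
      | [] => (1, out, sec)
      | [b] => (2, out, b)
      | b :: d :: _ => (3, out ++ ", " ++ b ++ ", and " ++ d, b) := by
  induction items with
  | nil => simp [pvAltLoop, pvClean]
  | cons x t ih =>
    rw [pvClean_cons]
    by_cases hx : x = ""
    · simpa [pvAltLoop, hx] using ih
    · by_cases hs : PySem.Str.strip x = ""
      · simpa [pvAltLoop, hx, hs] using ih
      · cases h : pvClean t with
        | nil => simp [pvAltLoop, hx, hs, pvLoop2, h]
        | cons d r => simp [pvAltLoop, hx, hs, pvLoop2, h]

-- B's loop from the initial state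
theorem pvLoop0 (items : List String) :
    pvAltLoop items 0 "" "" =
      match pvClean items with
      | [] => (0, "", "")
      | [a] => (1, a, "")
      | [a, b] => (2, a, b)
      | a :: b :: d :: _ => (3, a ++ ", " ++ b ++ ", and " ++ d, b) := by
  induction items with
  | nil => simp [pvAltLoop, pvClean]
  | cons x t ih =>
    rw [pvClean_cons]
    by_cases hx : x = ""
    · simpa [pvAltLoop, hx] using ih
    · by_cases hs : PySem.Str.strip x = ""
      · simpa [pvAltLoop, hx, hs] using ih
      · rcases h : pvClean t with _ | ⟨b, _ | ⟨d, r⟩⟩ <;>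
          simp [pvAltLoop, hx, hs, pvLoop1, h]

-- the two sentence builders agree once both are phrased over the cleaned stream c
theorem pv_main (c : List String) :
    (let cleaned := c.take 3;
     if cleaned = [] then ""
     else if cleaned.length = 1 then PySem.List.pyGetD cleaned 0 ""
     else if cleaned.length = 2 then
       PySem.List.pyGetD cleaned 0 "" ++ " and " ++ PySem.List.pyGetD cleaned 1 ""
     else
       PySem.List.pyGetD cleaned 0 "" ++ ", " ++ PySem.List.pyGetD cleaned 1 ""
         ++ ", and " ++ PySem.List.pyGetD cleaned 2 "") =
    (let r : Nat × String × String :=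
       match c with
       | [] => (0, "", "")
       | [a] => (1, a, "")
       | [a, b] => (2, a, b)
       | a :: b :: d :: _ => (3, a ++ ", " ++ b ++ ", and " ++ d, b)
     if r.1 = 2 then r.2.1 ++ " and " ++ r.2.2 else r.2.1) := by
  match c with
  | [] => rfl
  | [a] => simp [PySem.List.pyGetD, PySem.List.pyGet?, PySem.List.pyIdx?]
  | [a, b] => simp [PySem.List.pyGetD, PySem.List.pyGet?, PySem.List.pyIdx?]
  | a :: b :: d :: t => simp [PySem.List.pyGetD, PySem.List.pyGet?, PySem.List.pyIdx?]

-- ===== VERDICT (by name: the statement is the Claim_ definition above) =====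
theorem format_issue_list_py_spec : Claim_equal_format_issue_list_py := by
  intro items _
  unfold Spec_format_issue_list_py format_issue_list_py format_issue_list_py_alt
  rw [show (3:Int) = ((3:Nat):Int) from rfl, PySem.List.slice_to_natCast, pvLoop0]
  exact pv_main (pvClean items)
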